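-- pv_equiv track=rewrite | github.com/hernamesbarbara/cloakpivot | cloakpivot/formats/serialization.py | _process_markdown_content
-- ===== SOURCE A (Python) =====
-- def _process_markdown_content(content: str) -> str:
--     """Apply markdown-specific processing for masked content.
--
--     Args:
--         content: Raw markdown content
--
--     Returns:
--         Processed markdown content
--     """
--     # Ensure masked tokens are properly escaped for markdown
--     # Common replacement tokens that might need escaping
--     replacements = [
--         ("***", "\\*\\*\\*"),  # Escape asterisks that might interfere with markdown
--         ("___", "\\_\\_\\_"),  # Escape underscores
--         ("###", "\\#\\#\\#"),  # Escape hash symbols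
--     ]
--
--     processed = content
--     for original, escaped in replacements:
--         # Only escape if it appears to be a replacement token (e.g., surrounded by brackets or standalone)
--         if f"[{original}]" in processed:
--             processed = processed.replace(f"[{original}]", f"[{escaped}]")
--
--     return processed
-- ===== SOURCE B (Python) =====
-- def _process_markdown_content(content: str) -> str:
--     """Single left-to-right scan: at each position replace a bracketed
--     token ([***], [___], [###]) by its escaped form, else copy the char."""
--     escaped = {
--         "[***]": "[\\*\\*\\*]",
--         "[___]": "[\\_\\_\\_]",
--         "[###]": "[\\#\\#\\#]",
--     }
--     out = []
--     i = 0
--     n = len(content)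
--     while i < n:
--         tok = content[i:i + 5]
--         rep = escaped.get(tok)
--         if rep is not None:
--             out.append(rep)
--             i += 5
--         else:
--             out.append(content[i])
--             i += 1
--     return "".join(out)
-- ===== Notes on version B (the rewrite author's own statement) =====
-- stated objective: alternative
-- what changed: Replaced A's three sequential full str.replace passes (each preceded by a containment scan) by a single left-to-right scan that looks each 5-character window up in a token-to-escaped dict and substitutes on sight.
import Mathlib
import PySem

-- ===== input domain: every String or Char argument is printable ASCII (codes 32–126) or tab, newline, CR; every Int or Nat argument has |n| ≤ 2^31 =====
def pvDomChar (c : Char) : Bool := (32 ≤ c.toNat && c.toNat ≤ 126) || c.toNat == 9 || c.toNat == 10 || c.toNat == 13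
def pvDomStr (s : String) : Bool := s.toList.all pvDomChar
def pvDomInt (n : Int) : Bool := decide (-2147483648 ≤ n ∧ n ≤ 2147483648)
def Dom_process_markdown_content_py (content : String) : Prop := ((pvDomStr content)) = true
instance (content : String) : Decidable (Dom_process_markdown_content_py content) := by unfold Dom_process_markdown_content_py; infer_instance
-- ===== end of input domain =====

-- B replaces A's three sequential str.replace passes by a single left-to-right scan
-- that substitutes each bracketed token on sight (objective: alternative single-pass algorithm).


-- ===== PORT A =====
-- the loop over the 3-element literal `replacements` list is unrolled into its three iterations
def process_markdown_content_py (content : String) : String :=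
  let processed := content
  let processed := if PySem.Str.isIn "[***]" processed then
      PySem.Str.replace processed "[***]" "[\\*\\*\\*]" else processed
  let processed := if PySem.Str.isIn "[___]" processed then
      PySem.Str.replace processed "[___]" "[\\_\\_\\_]" else processed
  let processed := if PySem.Str.isIn "[###]" processed then
      PySem.Str.replace processed "[###]" "[\\#\\#\\#]" else processed
  processed

-- ===== PORT B =====
-- the `escaped` dict of Source B
def pvEsc : PySem.Dict (List Char) (List Char) :=
  PySem.Dict.ofList
    [("[***]".toList, "[\\*\\*\\*]".toList),
     ("[___]".toList, "[\\_\\_\\_]".toList),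
     ("[###]".toList, "[\\#\\#\\#]".toList)]

-- the while loop of Source B: content[i:i+5] is `List.take 5` of the remaining suffix
def pvScan : List Char → List Char
  | [] => []
  | c :: t =>
    match pvEsc.get? (List.take 5 (c :: t)) with
    | some rep => rep ++ pvScan (List.drop 5 (c :: t))
    | none => c :: pvScan t
termination_by l => l.length
decreasing_by
  · simp only [List.drop_succ_cons, List.length_cons, List.length_drop]; omega
  · simp

def process_markdown_content_py_alt (content : String) : String :=
  String.ofList (pvScan content.toList)

-- ===== PRECONDITION & SPEC =====
def Spec_process_markdown_content_py (content : String) (out : String) : Prop := out = process_markdown_content_py_alt content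
instance (content : String) (out : String) : Decidable (Spec_process_markdown_content_py content out) := by unfold Spec_process_markdown_content_py; infer_instance

-- ===== CLAIM (what is proved, stated in full; the proofs are below) =====
def Claim_equal_process_markdown_content_py : Prop := ∀ (content : String), Dom_process_markdown_content_py content → Spec_process_markdown_content_py content (process_markdown_content_py content)

-- ===== LEMMAS AND PROOFS =====

-- fuel-free form of PySem.Chars.replace for a nonempty pattern c0 :: ol
def pvRep (c0 : Char) (ol new : List Char) : List Char → List Char
  | [] => []
  | c :: t =>
    if (c0 :: ol).isPrefixOf (c :: t) then new ++ pvRep c0 ol new (List.drop ol.length t)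
    else c :: pvRep c0 ol new t
termination_by l => l.length
decreasing_by
  · simp only [List.length_cons, List.length_drop]; omega
  · simp

theorem pvGo_spec (c0 : Char) (ol new : List Char) :
    ∀ (fuel : Nat) (l acc : List Char), l.length ≤ fuel →
      PySem.Chars.replace.go (c0 :: ol) new fuel l acc = acc.reverse ++ pvRep c0 ol new l := by
  intro fuel
  induction fuel with
  | zero =>
    intro l acc h
    have hl : l = [] := List.eq_nil_of_length_eq_zero (Nat.le_zero.mp h)
    subst hl
    simp [PySem.Chars.replace.go, pvRep]
  | succ n ih =>
    intro l acc h
    cases l with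
    | nil => simp [PySem.Chars.replace.go, pvRep]
    | cons c t =>
      rw [PySem.Chars.replace.go, pvRep]
      by_cases hp : (c0 :: ol).isPrefixOf (c :: t)
      · rw [if_pos hp, if_pos hp]
        have hlen : (List.drop (c0 :: ol).length (c :: t)).length ≤ n := by
          simp only [List.length_drop, List.length_cons] at *
          omega
        rw [ih _ _ hlen]
        simp [List.length_cons, List.drop_succ_cons]
      · rw [if_neg hp, if_neg hp]
        rw [ih _ _ (by simp at h ⊢; omega)]
        simp

theorem pvReplace_eq (c0 : Char) (ol new s : List Char) :
    PySem.Chars.replace s (c0 :: ol) new = pvRep c0 ol new s := by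
  rw [PySem.Chars.replace]
  simp only [List.isEmpty_cons, if_false, Bool.false_eq_true]
  simpa using pvGo_spec c0 ol new s.length s [] (le_refl _)

theorem pvRep_id (c0 : Char) (ol new : List Char) :
    ∀ s, ¬ (c0 :: ol) <:+: s → pvRep c0 ol new s = s := by
  intro s
  induction s with
  | nil => intro _; rw [pvRep]
  | cons c t ih =>
    intro h
    rw [pvRep]
    by_cases hp : (c0 :: ol).isPrefixOf (c :: t)
    · exact absurd ((List.isPrefixOf_iff_prefix.mp hp).isInfix) h
    · rw [if_neg hp, ih (fun hi => h (List.infix_cons hi))]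

-- A's replace when the pattern does not occur is the identity: shown above (pvRep_id).
-- cons step of pvRep when the pattern is not a prefix
theorem pvRep_cons_of_not_prefix (c0 : Char) (ol new : List Char) (c : Char) (t : List Char)
    (h : ¬ (c0 :: ol) <+: (c :: t)) :
    pvRep c0 ol new (c :: t) = c :: pvRep c0 ol new t := by
  rw [pvRep, if_neg (fun hb => h (List.isPrefixOf_iff_prefix.mp hb))]

-- prefix reflection: a '['-free prefix of pvRep's output (for a replacement starting
-- with '[') is already a prefix of the input
theorem pvRep_prefix_reflect (c0 : Char) (ol nr : List Char) :
    ∀ (u p : List Char), p <+: pvRep c0 ol ('[' :: nr) u → '[' ∉ p → p <+: u := by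
  intro u
  induction u with
  | nil =>
    intro p hp _
    rw [pvRep] at hp
    simpa using hp
  | cons c t ih =>
    intro p hp hfree
    rw [pvRep] at hp
    by_cases hb : (c0 :: ol).isPrefixOf (c :: t)
    · rw [if_pos hb] at hp
      cases p with
      | nil => exact List.nil_prefix
      | cons a q =>
        have : a = '[' := by
          have := (List.cons_prefix_cons.mp hp).1
          simpa using this
        exact absurd (this ▸ List.mem_cons_self) hfree
    · rw [if_neg hb] at hp
      cases p with
      | nil => exact List.nil_prefix
      | cons a q =>
        obtain ⟨rfl, hq⟩ := List.cons_prefix_cons.mp hp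
        exact List.cons_prefix_cons.mpr ⟨rfl, ih q hq (fun hm => hfree (List.mem_cons_of_mem _ hm))⟩

-- consume lemmas: pvRep on (token ++ u) replaces the leading token
theorem pvConsume1 (u : List Char) :
    pvRep '[' "***]".toList "[\\*\\*\\*]".toList ("[***]".toList ++ u)
      = "[\\*\\*\\*]".toList ++ pvRep '[' "***]".toList "[\\*\\*\\*]".toList u := by
  rw [show ("[***]".toList ++ u) = '['::'*'::'*'::'*'::']'::u from by simp]
  rw [pvRep]
  simp [List.isPrefixOf]

theorem pvConsume2 (u : List Char) :
    pvRep '[' "___]".toList "[\\_\\_\\_]".toList ("[___]".toList ++ u)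
      = "[\\_\\_\\_]".toList ++ pvRep '[' "___]".toList "[\\_\\_\\_]".toList u := by
  rw [show ("[___]".toList ++ u) = '['::'_'::'_'::'_'::']'::u from by simp]
  rw [pvRep]
  simp [List.isPrefixOf]

theorem pvConsume3 (u : List Char) :
    pvRep '[' "###]".toList "[\\#\\#\\#]".toList ("[###]".toList ++ u)
      = "[\\#\\#\\#]".toList ++ pvRep '[' "###]".toList "[\\#\\#\\#]".toList u := by
  rw [show ("[###]".toList ++ u) = '['::'#'::'#'::'#'::']'::u from by simp]
  rw [pvRep]
  simp [List.isPrefixOf]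

-- pass-through lemmas: pvRep walks over a block no occurrence can start in or straddle
theorem pvPass21 (X : List Char) :
    pvRep '[' "___]".toList "[\\_\\_\\_]".toList ("[\\*\\*\\*]".toList ++ X)
      = "[\\*\\*\\*]".toList ++ pvRep '[' "___]".toList "[\\_\\_\\_]".toList X := by
  simp [pvRep, List.isPrefixOf]

theorem pvPass31 (X : List Char) :
    pvRep '[' "###]".toList "[\\#\\#\\#]".toList ("[\\*\\*\\*]".toList ++ X)
      = "[\\*\\*\\*]".toList ++ pvRep '[' "###]".toList "[\\#\\#\\#]".toList X := by
  simp [pvRep, List.isPrefixOf]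

theorem pvPass12 (u : List Char) :
    pvRep '[' "***]".toList "[\\*\\*\\*]".toList ("[___]".toList ++ u)
      = "[___]".toList ++ pvRep '[' "***]".toList "[\\*\\*\\*]".toList u := by
  simp [pvRep, List.isPrefixOf]

theorem pvPass32 (X : List Char) :
    pvRep '[' "###]".toList "[\\#\\#\\#]".toList ("[\\_\\_\\_]".toList ++ X)
      = "[\\_\\_\\_]".toList ++ pvRep '[' "###]".toList "[\\#\\#\\#]".toList X := by
  simp [pvRep, List.isPrefixOf]

theorem pvPass13 (u : List Char) :
    pvRep '[' "***]".toList "[\\*\\*\\*]".toList ("[###]".toList ++ u)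
      = "[###]".toList ++ pvRep '[' "***]".toList "[\\*\\*\\*]".toList u := by
  simp [pvRep, List.isPrefixOf]

theorem pvPass23 (u : List Char) :
    pvRep '[' "___]".toList "[\\_\\_\\_]".toList ("[###]".toList ++ u)
      = "[###]".toList ++ pvRep '[' "___]".toList "[\\_\\_\\_]".toList u := by
  simp [pvRep, List.isPrefixOf]

-- pvScan unfolding lemmas
theorem pvScan_nil : pvScan [] = [] := by rw [pvScan]

theorem pvScan1 (u : List Char) :
    pvScan ("[***]".toList ++ u) = "[\\*\\*\\*]".toList ++ pvScan u := by
  rw [show ("[***]".toList ++ u) = '['::'*'::'*'::'*'::']'::u from by simp]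
  rw [pvScan]
  rw [show List.take 5 ('['::'*'::'*'::'*'::']'::u) = ['[','*','*','*',']'] from by
        simp [List.take_succ_cons]]
  rw [show pvEsc.get? ['[','*','*','*',']'] = some "[\\*\\*\\*]".toList from by decide]
  simp [List.drop_succ_cons]

theorem pvScan2 (u : List Char) :
    pvScan ("[___]".toList ++ u) = "[\\_\\_\\_]".toList ++ pvScan u := by
  rw [show ("[___]".toList ++ u) = '['::'_'::'_'::'_'::']'::u from by simp]
  rw [pvScan]
  rw [show List.take 5 ('['::'_'::'_'::'_'::']'::u) = ['[','_','_','_',']'] from by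
        simp [List.take_succ_cons]]
  rw [show pvEsc.get? ['[','_','_','_',']'] = some "[\\_\\_\\_]".toList from by decide]
  simp [List.drop_succ_cons]

theorem pvScan3 (u : List Char) :
    pvScan ("[###]".toList ++ u) = "[\\#\\#\\#]".toList ++ pvScan u := by
  rw [show ("[###]".toList ++ u) = '['::'#'::'#'::'#'::']'::u from by simp]
  rw [pvScan]
  rw [show List.take 5 ('['::'#'::'#'::'#'::']'::u) = ['[','#','#','#',']'] from by
        simp [List.take_succ_cons]]
  rw [show pvEsc.get? ['[','#','#','#',']'] = some "[\\#\\#\\#]".toList from by decide]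
  simp [List.drop_succ_cons]

theorem pvScan_cons (c : Char) (t : List Char)
    (h1 : List.take 5 (c :: t) ≠ "[***]".toList)
    (h2 : List.take 5 (c :: t) ≠ "[___]".toList)
    (h3 : List.take 5 (c :: t) ≠ "[###]".toList) :
    pvScan (c :: t) = c :: pvScan t := by
  rw [pvScan]
  have hi : pvEsc.items = [("[***]".toList, "[\\*\\*\\*]".toList),
     ("[___]".toList, "[\\_\\_\\_]".toList),
     ("[###]".toList, "[\\#\\#\\#]".toList)] := by decide
  have b1 : ("[***]".toList == List.take 5 (c :: t)) = false :=
    beq_eq_false_iff_ne.mpr (Ne.symm h1)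
  have b2 : ("[___]".toList == List.take 5 (c :: t)) = false :=
    beq_eq_false_iff_ne.mpr (Ne.symm h2)
  have b3 : ("[###]".toList == List.take 5 (c :: t)) = false :=
    beq_eq_false_iff_ne.mpr (Ne.symm h3)
  have hg : pvEsc.get? (List.take 5 (c :: t)) = none := by
    simp only [PySem.Dict.get?, hi, List.find?, b1, b2, b3]
    rfl
  rw [hg]

-- a token equal to take 5 of s is a prefix of s
theorem pvTake_prefix (s tok : List Char) (h : List.take 5 s = tok) : tok <+: s :=
  h ▸ List.take_prefix 5 s

-- B's port never calls pvRep; pvRep is a proof-side characterisation of A's replace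
theorem main_eq : ∀ s : List Char,
    pvRep '[' "###]".toList "[\\#\\#\\#]".toList
      (pvRep '[' "___]".toList "[\\_\\_\\_]".toList
        (pvRep '[' "***]".toList "[\\*\\*\\*]".toList s)) = pvScan s := by
  have H : ∀ n : Nat, ∀ s : List Char, s.length ≤ n →
      pvRep '[' "###]".toList "[\\#\\#\\#]".toList
        (pvRep '[' "___]".toList "[\\_\\_\\_]".toList
          (pvRep '[' "***]".toList "[\\*\\*\\*]".toList s)) = pvScan s := by
    intro n
    induction n with
    | zero =>
      intro s hs
      have : s = [] := List.eq_nil_of_length_eq_zero (Nat.le_zero.mp hs)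
      subst this
      rw [pvRep, pvRep, pvRep, pvScan_nil]
    | succ n ih =>
      intro s hs
      by_cases ha : "[***]".toList <+: s
      · obtain ⟨u, rfl⟩ := ha
        rw [pvConsume1, pvPass21, pvPass31, pvScan1]
        have hu : u.length ≤ n := by simp at hs; omega
        rw [ih u hu]
      · by_cases hb : "[___]".toList <+: s
        · obtain ⟨u, rfl⟩ := hb
          rw [pvPass12, pvConsume2, pvPass32, pvScan2]
          have hu : u.length ≤ n := by simp at hs; omega
          rw [ih u hu]
        · by_cases hc : "[###]".toList <+: s
          · obtain ⟨u, rfl⟩ := hc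
            rw [pvPass13, pvPass23, pvConsume3, pvScan3]
            have hu : u.length ≤ n := by simp at hs; omega
            rw [ih u hu]
          · cases s with
            | nil => rw [pvRep, pvRep, pvRep, pvScan_nil]
            | cons c t =>
              rw [pvRep_cons_of_not_prefix _ _ _ _ _ (by simpa using ha)]
              have hb' : ¬ ("[___]".toList : List Char) <+:
                  (c :: pvRep '[' "***]".toList "[\\*\\*\\*]".toList t) := by
                intro h
                apply hb
                rw [show ("[___]".toList : List Char) = '[' :: "___]".toList from by decide] at h ⊢
                obtain ⟨rfl, hq⟩ := List.cons_prefix_cons.mp h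
                refine List.cons_prefix_cons.mpr ⟨rfl, ?_⟩
                have := pvRep_prefix_reflect '[' "***]".toList "\\*\\*\\*]".toList t
                  "___]".toList (by
                    rw [show ('[' :: ("\\*\\*\\*]".toList) : List Char) = "[\\*\\*\\*]".toList from by decide]
                    exact hq) (by decide)
                exact this
              rw [pvRep_cons_of_not_prefix _ _ _ _ _ (by simpa using hb')]
              have hc' : ¬ ("[###]".toList : List Char) <+:
                  (c :: pvRep '[' "___]".toList "[\\_\\_\\_]".toList
                    (pvRep '[' "***]".toList "[\\*\\*\\*]".toList t)) := by
                intro h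
                apply hc
                rw [show ("[###]".toList : List Char) = '[' :: "###]".toList from by decide] at h ⊢
                obtain ⟨rfl, hq⟩ := List.cons_prefix_cons.mp h
                refine List.cons_prefix_cons.mpr ⟨rfl, ?_⟩
                have h2 := pvRep_prefix_reflect '[' "___]".toList "\\_\\_\\_]".toList
                  (pvRep '[' "***]".toList "[\\*\\*\\*]".toList t) "###]".toList (by
                    rw [show ('[' :: ("\\_\\_\\_]".toList) : List Char) = "[\\_\\_\\_]".toList from by decide]
                    exact hq) (by decide)
                have h1 := pvRep_prefix_reflect '[' "***]".toList "\\*\\*\\*]".toList t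
                  "###]".toList (by
                    rw [show ('[' :: ("\\*\\*\\*]".toList) : List Char) = "[\\*\\*\\*]".toList from by decide]
                    exact h2) (by decide)
                exact h1
              rw [pvRep_cons_of_not_prefix _ _ _ _ _ (by simpa using hc')]
              rw [pvScan_cons c t (fun he => ha (pvTake_prefix _ _ he))
                    (fun he => hb (pvTake_prefix _ _ he))
                    (fun he => hc (pvTake_prefix _ _ he))]
              have ht : t.length ≤ n := by simp at hs; omega
              rw [ih t ht]
  intro s
  exact H s.length s (le_refl _)

-- ===== VERDICT (by name: the statement is the Claim_ definition above) =====
-- one guarded replace pass of port A, on the character list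
theorem pvStep (s tok esc : String) (c0 : Char) (ol : List Char) (htok : tok.toList = c0 :: ol) :
    (if PySem.Str.isIn tok s then PySem.Str.replace s tok esc else s).toList
      = pvRep c0 ol esc.toList s.toList := by
  by_cases h : PySem.Str.isIn tok s
  · rw [if_pos h, PySem.Str.toList_replace, htok, pvReplace_eq]
  · rw [if_neg h]
    have hf : PySem.Chars.isIn tok.toList s.toList = false := by
      rw [← PySem.Str.isIn_eq]
      exact Bool.eq_false_iff.mpr h
    exact (pvRep_id _ _ _ _ ((PySem.Chars.isIn_eq_false_iff _ _).mp (htok ▸ hf))).symm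

theorem process_markdown_content_py_spec : Claim_equal_process_markdown_content_py := by
  intro content _
  unfold Spec_process_markdown_content_py
  unfold process_markdown_content_py process_markdown_content_py_alt
  simp only []
  refine Eq.trans (String.ofList_toList (s := _)).symm (congrArg String.ofList ?_)
  rw [pvStep _ "[###]" "[\\#\\#\\#]" '[' "###]".toList (by decide)]
  rw [pvStep _ "[___]" "[\\_\\_\\_]" '[' "___]".toList (by decide)]
  rw [pvStep content "[***]" "[\\*\\*\\*]" '[' "***]".toList (by decide)]
  rw [main_eq]
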